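-- pv_equiv track=rewrite | github.com/J-TUREK/nft-collection-concept | src/stitch_images.py | collection
-- ===== SOURCE A (Python) =====
-- def collection(n=100):
--     '''
--     Collection of tuples representing the images, sliced and rotated
--     '''
--
--     collection = range(1, n + 1)
--
--     store = []
--
--     for original_image in collection:
--
--         # split each image into 9 pieces.
--         for i in range(1, 10):
--
--             # create 4 copies of the piece, each representing a unique rotation
--             for x in range(1, 5):
--
--                 store.append((original_image, i, x))
--
--     return store
-- ===== SOURCE B (Python) =====
-- def collection(n=100):
--     '''
--     Collection of tuples representing the images, sliced and rotated
--     '''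
--     store = []
--     for idx in range(36 * n):
--         img, rem = divmod(idx, 36)
--         piece, rot = divmod(rem, 4)
--         store.append((img + 1, piece + 1, rot + 1))
--     return store
-- ===== Notes on version B (the rewrite author's own statement) =====
-- stated objective: alternative
-- what changed: Replaces the three nested loops by one flat pass over range(36*n), recovering image/piece/rotation coordinates from the flat index with divmod arithmetic.
import Mathlib
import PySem

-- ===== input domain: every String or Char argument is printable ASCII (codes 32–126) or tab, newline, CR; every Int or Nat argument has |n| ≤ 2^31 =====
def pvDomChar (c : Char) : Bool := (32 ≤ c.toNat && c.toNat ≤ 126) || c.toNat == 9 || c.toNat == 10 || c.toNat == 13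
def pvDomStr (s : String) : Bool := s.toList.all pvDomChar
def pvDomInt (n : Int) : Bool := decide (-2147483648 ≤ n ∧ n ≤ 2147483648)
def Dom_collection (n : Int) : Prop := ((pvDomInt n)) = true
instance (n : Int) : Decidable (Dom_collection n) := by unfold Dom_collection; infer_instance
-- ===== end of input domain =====

-- B replaces A's three nested loops by a single flat pass over range(36*n) that recovers
-- the (image, piece, rotation) coordinates from the flat index by divmod arithmetic.

-- ===== PORT A =====
-- Python's list is a dynamic array and store.append an O(1) push: store is an Array
def collection (n : Int) : List (Int × Int × Int) :=
  ((PySem.List.pyRange 1 (n + 1) 1).foldl (fun store original_image =>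
    (PySem.List.pyRange 1 10 1).foldl (fun store i =>
      (PySem.List.pyRange 1 5 1).foldl (fun store x =>
        store.push (original_image, i, x)) store) store)
    (#[] : Array (Int × Int × Int))).toList

-- ===== PORT B =====
-- divmod(a, b) for the literal nonzero divisors 36 and 4 is exactly (floordiv a b, mod a b)
def collection_alt (n : Int) : List (Int × Int × Int) :=
  ((PySem.List.pyRange 0 (36 * n) 1).foldl (fun store idx =>
    let img := PySem.Int.floordiv idx 36
    let rem := PySem.Int.mod idx 36
    let piece := PySem.Int.floordiv rem 4
    let rot := PySem.Int.mod rem 4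
    store.push (img + 1, piece + 1, rot + 1))
    (#[] : Array (Int × Int × Int))).toList

-- ===== PRECONDITION & SPEC =====
def Spec_collection (n : Int) (out : List (Int × Int × Int)) : Prop := out = collection_alt n
instance (n : Int) (out : List (Int × Int × Int)) : Decidable (Spec_collection n out) := by unfold Spec_collection; infer_instance

-- ===== CLAIM (what is proved, stated in full; the proofs are below) =====
def Claim_equal_collection : Prop := ∀ (n : Int), Dom_collection n → Spec_collection n (collection n)

-- ===== LEMMAS AND PROOFS =====

/-- the 36 tuples A generates for one image -/
def pvBlock (oi : Int) : List (Int × Int × Int) :=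
  [(oi,1,1),(oi,1,2),(oi,1,3),(oi,1,4),(oi,2,1),(oi,2,2),(oi,2,3),(oi,2,4),
   (oi,3,1),(oi,3,2),(oi,3,3),(oi,3,4),(oi,4,1),(oi,4,2),(oi,4,3),(oi,4,4),
   (oi,5,1),(oi,5,2),(oi,5,3),(oi,5,4),(oi,6,1),(oi,6,2),(oi,6,3),(oi,6,4),
   (oi,7,1),(oi,7,2),(oi,7,3),(oi,7,4),(oi,8,1),(oi,8,2),(oi,8,3),(oi,8,4),
   (oi,9,1),(oi,9,2),(oi,9,3),(oi,9,4)]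

/-- the tuple B generates at flat index idx -/
def pvF (idx : Int) : Int × Int × Int :=
  (PySem.Int.floordiv idx 36 + 1,
   PySem.Int.floordiv (PySem.Int.mod idx 36) 4 + 1,
   PySem.Int.mod (PySem.Int.mod idx 36) 4 + 1)

lemma pvF_eq (m k : Int) (h0 : 0 ≤ k) (h1 : k < 36) :
    pvF (36 * m + k) = (m + 1, k / 4 + 1, k % 4 + 1) := by
  unfold pvF
  have e36 : ∀ a : Int, PySem.Int.floordiv a 36 = a / 36 := by
    intro a
    exact PySem.Int.floordiv_eq_ediv_of_pos (by norm_num)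
  have m36 : ∀ a : Int, PySem.Int.mod a 36 = a % 36 := by
    intro a
    exact PySem.Int.mod_eq_emod_of_pos (by norm_num)
  have e4 : ∀ a : Int, PySem.Int.floordiv a 4 = a / 4 := by
    intro a
    exact PySem.Int.floordiv_eq_ediv_of_pos (by norm_num)
  have m4 : ∀ a : Int, PySem.Int.mod a 4 = a % 4 := by
    intro a
    exact PySem.Int.mod_eq_emod_of_pos (by norm_num)
  simp only [e36, m36, e4, m4]
  have h2 : (36 * m + k) % 36 = k := by omega
  have h3 : (36 * m + k) / 36 = m := by omega
  rw [h2, h3]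

lemma pvF_natk (m : Int) (k : Nat) (h : k < 36) :
    pvF (36 * m + (k : Int)) = (m + 1, ((k / 4 : Nat) : Int) + 1, ((k % 4 : Nat) : Int) + 1) := by
  rw [pvF_eq m (k : Int) (by positivity) (by exact_mod_cast h)]
  congr 2

lemma pvPushFoldl {α β : Type} (l : List α) (g : α → β) (arr : Array β) :
    (l.foldl (fun acc x => acc.push (g x)) arr).toList = arr.toList ++ l.map g := by
  induction l generalizing arr with
  | nil => simp
  | cons y t ih => simp [List.foldl_cons, ih]

lemma pvFoldlFlatMap {α β : Type} (l : List α) (h : Array β → α → Array β) (g : α → List β)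
    (H : ∀ arr x, (h arr x).toList = arr.toList ++ g x) (arr : Array β) :
    (l.foldl h arr).toList = arr.toList ++ l.flatMap g := by
  induction l generalizing arr with
  | nil => simp
  | cons y t ih => simp [List.foldl_cons, ih, H, List.flatMap_cons, List.append_assoc]

lemma pvInner (oi : Int) (store : Array (Int × Int × Int)) :
    ((PySem.List.pyRange 1 10 1).foldl (fun store i =>
      (PySem.List.pyRange 1 5 1).foldl (fun store x =>
        store.push (oi, i, x)) store) store).toList = store.toList ++ pvBlock oi := by
  have h10 : PySem.List.pyRange 1 10 1 = [1,2,3,4,5,6,7,8,9] := by decide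
  have h5 : PySem.List.pyRange 1 5 1 = [1,2,3,4] := by decide
  simp [h10, h5, pvBlock, Array.toList_push, List.append_assoc]

lemma pvAFlat (n : Int) :
    collection n = (PySem.List.pyRange 1 (n + 1) 1).flatMap pvBlock := by
  unfold collection
  have h := pvFoldlFlatMap (PySem.List.pyRange 1 (n + 1) 1)
    (fun store original_image =>
      (PySem.List.pyRange 1 10 1).foldl (fun store i =>
        (PySem.List.pyRange 1 5 1).foldl (fun store x =>
          store.push (original_image, i, x)) store) store)
    pvBlock (fun arr oi => pvInner oi arr) (#[] : Array (Int × Int × Int))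
  simpa using h

lemma pvBFlat (n : Int) :
    collection_alt n = (PySem.List.pyRange 0 (36 * n) 1).map pvF := by
  unfold collection_alt
  have he : (fun (store : Array (Int × Int × Int)) idx =>
      let img := PySem.Int.floordiv idx 36
      let rem := PySem.Int.mod idx 36
      let piece := PySem.Int.floordiv rem 4
      let rot := PySem.Int.mod rem 4
      store.push (img + 1, piece + 1, rot + 1))
      = fun store idx => store.push (pvF idx) := by
    funext store idx; simp [pvF]
  rw [he]
  rw [pvPushFoldl (PySem.List.pyRange 0 (36 * n) 1) pvF (#[] : Array (Int × Int × Int))]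
  simp

lemma pvBlockEq (m : Int) :
    (PySem.List.pyRange (36 * m) (36 * m + 36) 1).map pvF = pvBlock (m + 1) := by
  rw [PySem.List.pyRange_one]
  have ht : (36 * m + 36 - 36 * m).toNat = 36 := by omega
  rw [ht, List.map_map]
  simp only [Function.comp_def]
  have hc : ∀ k ∈ List.range 36,
      pvF (36 * m + (k : Int))
        = ((m + 1, ((k / 4 : Nat) : Int) + 1, ((k % 4 : Nat) : Int) + 1) : Int × Int × Int) := by
    intro k hk
    exact pvF_natk m k (List.mem_range.mp hk)
  rw [List.map_congr_left hc]
  have hr : List.range 36 = [0,1,2,3,4,5,6,7,8,9,10,11,12,13,14,15,16,17,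
      18,19,20,21,22,23,24,25,26,27,28,29,30,31,32,33,34,35] := by decide
  rw [hr]
  simp only [List.map_cons, List.map_nil, pvBlock]
  norm_num

lemma pvMain (m : Nat) :
    (PySem.List.pyRange 1 ((m : Int) + 1) 1).flatMap pvBlock
      = (PySem.List.pyRange 0 (36 * (m : Int)) 1).map pvF := by
  induction m with
  | zero => decide
  | succ k ih =>
    push_cast
    have h1 : PySem.List.pyRange 1 ((k : Int) + 1 + 1) 1
        = PySem.List.pyRange 1 ((k : Int) + 1) 1 ++ [(k : Int) + 1] := by
      have h := PySem.List.pyRange_one_succ_right (a := 1) (b := (k : Int) + 1) (by omega)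
      simpa using h
    have h2 : PySem.List.pyRange 0 (36 * ((k : Int) + 1)) 1
        = PySem.List.pyRange 0 (36 * (k : Int)) 1
          ++ PySem.List.pyRange (36 * (k : Int)) (36 * (k : Int) + 36) 1 := by
      have h := PySem.List.pyRange_one_append (a := 0) (m := 36 * (k : Int))
        (b := 36 * (k : Int) + 36) (by omega) (by omega)
      rw [show (36 : Int) * ((k : Int) + 1) = 36 * (k : Int) + 36 by ring]
      exact h
    rw [h1, h2, List.flatMap_append, List.map_append, ih, pvBlockEq]
    simp [pvBlock]

-- ===== VERDICT (by name: the statement is the Claim_ definition above) =====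
theorem collection_spec : Claim_equal_collection := by
  intro n _
  unfold Spec_collection
  rw [pvAFlat, pvBFlat]
  by_cases hn : n ≤ 0
  · rw [PySem.List.pyRange_one_eq_nil (by omega), PySem.List.pyRange_one_eq_nil (by omega)]
    simp
  · obtain ⟨m, rfl⟩ : ∃ m : Nat, n = (m : Int) := ⟨n.toNat, by omega⟩
    exact pvMain m
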